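-- pv_equiv track=rewrite | github.com/c0pperdragon/ByteMachine | ByteCPU/assembler/byteasm.py | evaluate
-- ===== SOURCE A (Python) =====
-- class AssemblerException(Exception):
--     pass
--
-- def evaluate(identifiers, s):
--     try:
--         if s in identifiers:
--             return identifiers[s]
--         elif len(s)>0 and s[0]=='.':
--             return evaluate(identifiers, s[1:]) & 0xff
--         elif len(s)>0 and s[0]=='^':
--             return (evaluate(identifiers, s[1:]) >> 8) & 0xff
--         elif len(s)>0 and s[0]=='$':
--             return int(s[1:],16)
--         else:
--             return int(s,10)
--     except ValueError as e:
--         raise AssemblerException("Can not parse number "+s)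
-- ===== SOURCE B (Python) =====
-- class AssemblerException(Exception):
--     pass
--
-- def evaluate(identifiers, s):
--     try:
--         ops = []
--         while True:
--             if s in identifiers:
--                 v = identifiers[s]
--                 break
--             if len(s) > 0 and s[0] in ('.', '^'):
--                 ops.append(s[0])
--                 s = s[1:]
--                 continue
--             if len(s) > 0 and s[0] == '$':
--                 v = int(s[1:], 16)
--             else:
--                 v = int(s, 10)
--             break
--         for op in reversed(ops):
--             v = v & 0xff if op == '.' else (v >> 8) & 0xff
--         return v
--     except ValueError:
--         raise AssemblerException("Can not parse number " + s)
-- ===== Notes on version B (the rewrite author's own statement) =====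
-- stated objective: alternative
-- what changed: Replaces A's recursive descent (masks applied on the way back up the call stack) by a single iterative scan that records the pending '.'/'^' prefix operators in a list and applies them innermost-first in one reversed fold after the base value is found.
import Mathlib
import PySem

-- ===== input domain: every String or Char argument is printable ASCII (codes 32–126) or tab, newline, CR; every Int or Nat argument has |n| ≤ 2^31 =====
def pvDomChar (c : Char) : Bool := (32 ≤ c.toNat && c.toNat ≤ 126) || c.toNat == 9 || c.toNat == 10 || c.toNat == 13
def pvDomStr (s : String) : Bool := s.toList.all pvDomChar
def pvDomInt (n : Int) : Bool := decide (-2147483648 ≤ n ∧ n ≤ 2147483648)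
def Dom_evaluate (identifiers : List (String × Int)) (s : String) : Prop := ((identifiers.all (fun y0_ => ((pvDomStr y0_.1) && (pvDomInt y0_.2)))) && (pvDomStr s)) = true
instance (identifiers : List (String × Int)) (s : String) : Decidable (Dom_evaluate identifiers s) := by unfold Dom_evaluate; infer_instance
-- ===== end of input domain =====

-- B replaces A's recursion by a single iterative scan that records the pending prefix
-- operators and applies them innermost-first afterwards (objective: alternative decomposition).

-- shared helper: Python's `s in identifiers` + `identifiers[s]` on the dict built from the pairs
def lookupId (identifiers : List (String × Int)) (cs : List Char) : Option Int :=
  (PySem.Dict.ofList identifiers).get? (String.ofList cs)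

-- ===== PORT A =====
-- literal port of A's recursion; none = the Python raises AssemblerException (excluded by Pre_)
def evalA (identifiers : List (String × Int)) (cs : List Char) : Option Int :=
  match lookupId identifiers cs with
  | some v => some v
  | none =>
    match cs with
    | '.' :: rest => (evalA identifiers rest).map (fun v : Int => PySem.Int.band v 255)
    | '^' :: rest => (evalA identifiers rest).map (fun v : Int => PySem.Int.band (v >>> (8:Nat)) 255)
    | '$' :: rest => PySem.Int.ofCharsBase? rest 16
    | _ => PySem.Int.ofChars? cs

def evaluate (identifiers : List (String × Int)) (s : String) : Int :=
  (evalA identifiers s.toList).getD 0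

-- ===== PORT B =====
-- one mask step of Source B's final loop: '.' → & 0xff, otherwise ('^') → (>> 8) & 0xff
def maskOp (v : Int) (c : Char) : Int :=
  if c == '.' then PySem.Int.band v 255 else PySem.Int.band (v >>> (8:Nat)) 255

-- the while-loop of Source B: accumulate the prefix operators, return (ops, base value)
def scanB (identifiers : List (String × Int)) (ops : List Char) (cs : List Char) :
    Option (List Char × Int) :=
  match lookupId identifiers cs with
  | some v => some (ops, v)
  | none =>
    match cs with
    | c :: rest =>
      if c == '.' || c == '^' then scanB identifiers (ops ++ [c]) rest
      else if c == '$' then (PySem.Int.ofCharsBase? rest 16).map (fun v => (ops, v))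
      else (PySem.Int.ofChars? cs).map (fun v => (ops, v))
    | [] => (PySem.Int.ofChars? cs).map (fun v => (ops, v))

def evaluate_alt (identifiers : List (String × Int)) (s : String) : Int :=
  match scanB identifiers [] s.toList with
  | some (ops, v) => ops.reverse.foldl maskOp v
  | none => 0

-- ===== PRECONDITION & SPEC =====
-- Pre_ excludes exactly the inputs on which the Python A raises AssemblerException (ValueError caught):
-- no suffix reachable by stripping leading '.'/'^' is a known identifier and the stripped remainder
-- parses neither as '$'+hex nor as a decimal integer.
def Pre_evaluate (identifiers : List (String × Int)) (s : String) : Prop :=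
  (let cs := s.toList
   let k := (cs.takeWhile (fun c => c == '.' || c == '^')).length
   ((List.range (k + 1)).any (fun i => (lookupId identifiers (cs.drop i)).isSome)
    || (match cs.drop k with
        | '$' :: rest => (PySem.Int.ofCharsBase? rest 16).isSome
        | cs' => (PySem.Int.ofChars? cs').isSome))) = true
instance (identifiers : List (String × Int)) (s : String) : Decidable (Pre_evaluate identifiers s) := by
  unfold Pre_evaluate; infer_instance

def pvWitness_evaluate : (List (String × Int)) × String := ([("lbl", 770)], ".^lbl")

def Spec_evaluate (identifiers : List (String × Int)) (s : String) (out : Int) : Prop := out = evaluate_alt identifiers s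
instance (identifiers : List (String × Int)) (s : String) (out : Int) : Decidable (Spec_evaluate identifiers s out) := by unfold Spec_evaluate; infer_instance

-- ===== CLAIM (what is proved, stated in full; the proofs are below) =====
def Claim_equal_evaluate : Prop := ∀ (identifiers : List (String × Int)) (s : String), Dom_evaluate identifiers s → Pre_evaluate identifiers s → Spec_evaluate identifiers s (evaluate identifiers s)

-- ===== LEMMAS AND PROOFS =====

-- the scan with pending ops computes A's recursion with those ops still to be applied
theorem scanB_eq_evalA (identifiers : List (String × Int)) (cs ops : List Char) :
    (scanB identifiers ops cs).map (fun p => p.1.reverse.foldl maskOp p.2)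
      = (evalA identifiers cs).map (fun v => ops.reverse.foldl maskOp v) := by
  induction cs generalizing ops with
  | nil =>
    rw [scanB.eq_def, evalA.eq_def]
    cases h : lookupId identifiers [] with
    | some v => rfl
    | none => cases PySem.Int.ofChars? [] <;> rfl
  | cons c rest ih =>
    rw [scanB.eq_def, evalA.eq_def]
    cases h : lookupId identifiers (c :: rest) with
    | some v => rfl
    | none =>
      dsimp only []
      by_cases hd : c = '.'
      · subst hd
        simp only [show (('.' : Char) == '.' || ('.' : Char) == '^') = true from rfl, if_true]
        rw [ih]
        cases evalA identifiers rest with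
        | none => rfl
        | some v =>
          simp only [Option.map_some, List.reverse_append, List.reverse_cons, List.reverse_nil,
            List.nil_append, List.singleton_append, List.foldl_cons]
          rfl
      · by_cases hcar : c = '^'
        · subst hcar
          simp only [show (('^' : Char) == '.' || ('^' : Char) == '^') = true from rfl, if_true]
          rw [ih]
          cases evalA identifiers rest with
          | none => rfl
          | some v =>
            simp only [Option.map_some, List.reverse_append, List.reverse_cons, List.reverse_nil,
              List.nil_append, List.singleton_append, List.foldl_cons]
            rfl
        · have hno : (c == '.' || c == '^') = false := by simp [hd, hcar]
          rw [hno]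
          simp only [Bool.false_eq_true, if_false]
          by_cases hs : c = '$'
          · subst hs
            simp only [show (('$' : Char) == '$') = true from rfl, if_true]
            cases PySem.Int.ofCharsBase? rest 16 <;> rfl
          · have h2 : (c == '$') = false := by simp [hs]
            rw [h2]
            simp only [Bool.false_eq_true, if_false]
            have hmatch :
                (match c :: rest with
                  | '.' :: r => (evalA identifiers r).map (fun v : Int => PySem.Int.band v 255)
                  | '^' :: r => (evalA identifiers r).map (fun v : Int => PySem.Int.band (v >>> (8:Nat)) 255)
                  | '$' :: r => PySem.Int.ofCharsBase? r 16
                  | _ => PySem.Int.ofChars? (c :: rest))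
                  = PySem.Int.ofChars? (c :: rest) := by
              split
              · rename_i r hr; cases hr; exact absurd rfl hd
              · rename_i r hr; cases hr; exact absurd rfl hcar
              · rename_i r hr; cases hr; exact absurd rfl hs
              · rfl
            rw [hmatch]
            cases PySem.Int.ofChars? (c :: rest) <;> rfl

-- ===== VERDICT (by name: the statement is the Claim_ definition above) =====
theorem evaluate_spec : Claim_equal_evaluate := by
  intro identifiers s _ _
  unfold Spec_evaluate evaluate evaluate_alt
  have h := scanB_eq_evalA identifiers s.toList []
  simp only [List.reverse_nil, List.foldl_nil] at h
  cases hs : scanB identifiers [] s.toList with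
  | none =>
    rw [hs] at h
    cases he : evalA identifiers s.toList <;> rw [he] at h <;> simp_all
  | some p =>
    rw [hs] at h
    have : evalA identifiers s.toList = some (p.1.reverse.foldl maskOp p.2) := by
      cases he : evalA identifiers s.toList <;> rw [he] at h <;> simp_all
    rw [this]
    rfl
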